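-- pv_equiv track=rewrite | github.com/mmcclimon/advent-2023 | bin/day21.py | part_two
-- ===== SOURCE A (Python) =====
-- def part_two(grid, start, n_steps):
--     todo = [start]
--     len_r = 1 + max(r for r, _ in grid)
--     len_c = 1 + max(c for _, c in grid)
--
--     for n in range(n_steps):
--         next_round = set()
--
--         while todo:
--             cur = todo.pop()
--             for pos in neighbors_two(grid, (len_r, len_c), *cur):
--                 next_round.add(pos)
--
--         todo = list(next_round)
--
--     return len(todo)
--
-- def neighbors_two(grid, lens, r, c):
--     for rc in [(r + 1, c), (r - 1, c), (r, c + 1), (r, c - 1)]: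
--         r2, c2 = rc
--         r2 %= lens[0]
--         c2 %= lens[1]
--
--         if grid[r2, c2] != "#":
--             yield rc
-- ===== SOURCE B (Python) =====
-- def part_two(grid, start, n_steps):
--     # Level sets by increasing step count.  After the first few levels every
--     # cell of level k-2 was entered through an open cell and therefore repeats
--     # two steps later, so level k+1 = level k-1 | neighbours(level k - level k-2):
--     # each round expands only the fresh frontier instead of the whole level.
--     len_r = 1 + max(r for r, _ in grid)
--     len_c = 1 + max(c for _, c in grid)
--
--     def step(cells):
--         out = set()
--         for r, c in cells:
--             for r2, c2 in ((r + 1, c), (r - 1, c), (r, c + 1), (r, c - 1)):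
--                 if grid[r2 % len_r, c2 % len_c] != "#":
--                     out.add((r2, c2))
--         return out
--
--     levels = [{tuple(start)}]
--     while len(levels) <= min(n_steps, 3):
--         levels.append(step(levels[-1]))
--     if n_steps <= 3:
--         return len(levels[-1])
--
--     a, b, c = levels[-3], levels[-2], levels[-1]
--     for _ in range(n_steps - 3):
--         a, b, c = b, c, b | step(c - a)
--     return len(c)
-- ===== Notes on version B (the rewrite author's own statement) =====
-- stated objective: faster
-- what changed: Replaces the per-step re-expansion of the entire reachable set with incremental level sets: after three fully-expanded warm-up levels, each new level is the level two back united with the neighbours of the fresh frontier (level k minus level k-2), so only the frontier is expanded per round.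
import Mathlib
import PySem

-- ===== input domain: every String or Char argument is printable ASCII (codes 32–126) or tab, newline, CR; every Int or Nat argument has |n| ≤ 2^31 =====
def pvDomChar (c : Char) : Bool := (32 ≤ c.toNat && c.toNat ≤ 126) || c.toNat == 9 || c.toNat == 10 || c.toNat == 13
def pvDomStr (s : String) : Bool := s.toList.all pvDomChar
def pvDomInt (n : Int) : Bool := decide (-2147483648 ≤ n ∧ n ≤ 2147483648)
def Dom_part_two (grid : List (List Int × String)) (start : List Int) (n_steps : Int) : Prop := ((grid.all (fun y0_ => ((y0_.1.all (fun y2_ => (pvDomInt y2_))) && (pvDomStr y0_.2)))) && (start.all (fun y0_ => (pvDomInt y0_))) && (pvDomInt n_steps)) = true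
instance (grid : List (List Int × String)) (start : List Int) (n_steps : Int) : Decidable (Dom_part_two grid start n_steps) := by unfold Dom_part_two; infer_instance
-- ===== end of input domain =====

-- B computes the same level sets incrementally: after three warmed-up levels each new level is
-- the level two back united with the neighbours of the fresh frontier, so only the frontier is
-- expanded each round (objective: faster).

-- ===== PORT A =====
-- neighbors_two(grid, lens, r, c): '*cur' unpacking succeeds only for 2-element cells (a
-- TypeError otherwise is outside Pre_; the port yields [] there); a missing grid key is a
-- KeyError in Python (outside Pre_); the port's getD default "#" is never hit inside Pre_.
def neighbors_two (grid : List (List Int × String)) (lenR lenC : Int) (cur : List Int) : List (List Int) :=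
  match cur with
  | [r, c] =>
      [[r + 1, c], [r - 1, c], [r, c + 1], [r, c - 1]].filter (fun rc =>
        match rc with
        | [r2, c2] =>
            PySem.Dict.getD ⟨grid⟩ [PySem.Int.mod r2 lenR, PySem.Int.mod c2 lenC] "#" != "#"
        | _ => false)
  | _ => []

-- the body of A's 'for n in range(n_steps)' loop: drain todo (pop from the end), collecting
-- all neighbours into the set next_round
def part_two_step (grid : List (List Int × String)) (lenR lenC : Int)
    (todo : List (List Int)) : PySem.Set (List Int) :=
  todo.reverse.foldl
    (fun nextRound cur =>
      (neighbors_two grid lenR lenC cur).foldl (fun s pos => PySem.Set.add s pos) nextRound)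
    PySem.Set.empty

def part_two_rounds (grid : List (List Int × String)) (lenR lenC : Int) :
    Nat → List (List Int) → List (List Int)
  | 0, todo => todo
  | k + 1, todo => part_two_rounds grid lenR lenC k (part_two_step grid lenR lenC todo)

-- 'max(r for r, _ in grid)' raises on an empty grid and unpacks every key into exactly two
-- parts — both outside Pre_; under Pre_ every key is a 2-list, so headD 0 / getD 1 0 read r / c.
def part_two (grid : List (List Int × String)) (start : List Int) (n_steps : Int) : Int :=
  let lenR : Int := 1 + (((PySem.List.max? (grid.map (fun kv => kv.1.headD 0)) (fun r => r)).getD 0))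
  let lenC : Int := 1 + (((PySem.List.max? (grid.map (fun kv => kv.1.getD 1 0)) (fun c => c)).getD 0))
  ((part_two_rounds grid lenR lenC n_steps.toNat [start]).length : Int)

-- ===== PORT B =====
-- step(cells) of Source B: expand one level ('for r, c in cells' raises TypeError on a cell that
-- is not a pair — outside Pre_; the port skips such a cell)
def pt_step (grid : List (List Int × String)) (lenR lenC : Int)
    (cells : List (List Int)) : PySem.Set (List Int) :=
  cells.foldl
    (fun out cell =>
      match cell with
      | [r, c] =>
          [[r + 1, c], [r - 1, c], [r, c + 1], [r, c - 1]].foldl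
            (fun out rc =>
              match rc with
              | [r2, c2] =>
                  if PySem.Dict.getD ⟨grid⟩ [PySem.Int.mod r2 lenR, PySem.Int.mod c2 lenC] "#"
                      != "#" then PySem.Set.add out rc
                  else out
              | _ => out)
            out
      | _ => out)
    PySem.Set.empty

-- Source B's warm-up loop: 'while len(levels) <= min(n_steps, 3): levels.append(step(levels[-1]))',
-- run its (min n_steps 3).toNat iterations
def pt_warmup (grid : List (List Int × String)) (lenR lenC : Int) :
    Nat → List (PySem.Set (List Int)) → List (PySem.Set (List Int))
  | 0, levels => levels
  | k + 1, levels =>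
      pt_warmup grid lenR lenC k
        (levels ++ [pt_step grid lenR lenC (levels.getLastD PySem.Set.empty)])

-- Source B's main loop on (a, b, c): 'a, b, c = b, c, b | step(c - a)'
def pt_main (grid : List (List Int × String)) (lenR lenC : Int) :
    Nat → PySem.Set (List Int) × PySem.Set (List Int) × PySem.Set (List Int) →
    PySem.Set (List Int) × PySem.Set (List Int) × PySem.Set (List Int)
  | 0, st => st
  | k + 1, st =>
      pt_main grid lenR lenC k
        (st.2.1, st.2.2,
          PySem.Set.union st.2.1 (pt_step grid lenR lenC (PySem.Set.diff st.2.2 st.1)))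

def part_two_alt (grid : List (List Int × String)) (start : List Int) (n_steps : Int) : Int :=
  let lenR : Int := 1 + (((PySem.List.max? (grid.map (fun kv => kv.1.headD 0)) (fun r => r)).getD 0))
  let lenC : Int := 1 + (((PySem.List.max? (grid.map (fun kv => kv.1.getD 1 0)) (fun c => c)).getD 0))
  let levels := pt_warmup grid lenR lenC (min n_steps 3).toNat [PySem.Set.ofList [start]]
  if n_steps ≤ 3 then ((levels.getLastD PySem.Set.empty).length : Int)
  else
    let st := pt_main grid lenR lenC (n_steps - 3).toNat
      ((PySem.List.pyGet? levels (-3)).getD PySem.Set.empty,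
       (PySem.List.pyGet? levels (-2)).getD PySem.Set.empty,
       (PySem.List.pyGet? levels (-1)).getD PySem.Set.empty)
    (st.2.2.length : Int)

-- ===== PRECONDITION & SPEC =====
-- Pre_ = where the Python A returns normally: a nonempty dict with distinct 2-list keys
-- (else unpacking raises), and — when at least one step is taken — a length-2 start and a
-- complete 0-based rectangle of keys (else '*cur' raises TypeError or 'grid[r2, c2]' raises
-- KeyError / the modulus is not positive).
def Pre_part_two (grid : List (List Int × String)) (start : List Int) (n_steps : Int) : Prop :=
  grid ≠ [] ∧ (∀ kv ∈ grid, kv.1.length = 2) ∧ (grid.map (·.1)).Nodup ∧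
  (n_steps ≤ 0 ∨
    (start.length = 2 ∧
      (let lenR : Int := 1 + (((PySem.List.max? (grid.map (fun kv => kv.1.headD 0)) (fun r => r)).getD 0))
       let lenC : Int := 1 + (((PySem.List.max? (grid.map (fun kv => kv.1.getD 1 0)) (fun c => c)).getD 0))
       1 ≤ lenR ∧ 1 ≤ lenC ∧
       ∀ r ∈ PySem.List.pyRange 0 lenR 1, ∀ c ∈ PySem.List.pyRange 0 lenC 1,
         (PySem.Dict.get? ⟨grid⟩ [r, c]).isSome)))

instance (grid : List (List Int × String)) (start : List Int) (n_steps : Int) :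
    Decidable (Pre_part_two grid start n_steps) := by unfold Pre_part_two; infer_instance

def pvWitness_part_two : (List (List Int × String)) × List Int × Int :=
  ([([0, 0], "."), ([0, 1], "."), ([1, 0], "#"), ([1, 1], ".")], [0, 0], 3)

def Spec_part_two (grid : List (List Int × String)) (start : List Int) (n_steps : Int) (out : Int) : Prop := out = part_two_alt grid start n_steps
instance (grid : List (List Int × String)) (start : List Int) (n_steps : Int) (out : Int) : Decidable (Spec_part_two grid start n_steps out) := by unfold Spec_part_two; infer_instance

-- ===== CLAIM (what is proved, stated in full; the proofs are below) =====
def Claim_equal_part_two : Prop := ∀ (grid : List (List Int × String)) (start : List Int) (n_steps : Int), Dom_part_two grid start n_steps → Pre_part_two grid start n_steps → Spec_part_two grid start n_steps (part_two grid start n_steps)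

-- ===== LEMMAS AND PROOFS =====

-- the four neighbour candidates of [r, c]
def pvCand (r c : Int) : List (List Int) := [[r + 1, c], [r - 1, c], [r, c + 1], [r, c - 1]]

-- the cell is open ('grid[p mod lens] != "#"'), on 2-lists
def pvOpen (grid : List (List Int × String)) (lenR lenC : Int) (x : List Int) : Bool :=
  match x with
  | [r, c] => PySem.Dict.getD ⟨grid⟩ [PySem.Int.mod r lenR, PySem.Int.mod c lenC] "#" != "#"
  | _ => false

-- cells reachable in exactly k steps from start
def Sn (grid : List (List Int × String)) (lenR lenC : Int) (start : List Int) :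
    Nat → List Int → Prop
  | 0 => fun x => x = start
  | k + 1 => fun x => ∃ y, Sn grid lenR lenC start k y ∧ x ∈ neighbors_two grid lenR lenC y

theorem neighbors_two_pair (grid : List (List Int × String)) (lenR lenC : Int) (r c : Int) :
    neighbors_two grid lenR lenC [r, c] = (pvCand r c).filter (pvOpen grid lenR lenC) := rfl

theorem neighbors_two_shape (grid : List (List Int × String)) (lenR lenC : Int)
    {y x : List Int} (h : x ∈ neighbors_two grid lenR lenC y) :
    ∃ r c, y = [r, c] ∧ x ∈ pvCand r c ∧ pvOpen grid lenR lenC x = true := by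
  rcases y with _ | ⟨r, _ | ⟨c, _ | ⟨d, t⟩⟩⟩
  · simp [neighbors_two] at h
  · simp [neighbors_two] at h
  · rw [neighbors_two_pair, List.mem_filter] at h
    exact ⟨r, c, rfl, h.1, h.2⟩
  · simp [neighbors_two] at h

theorem mem_neighbors_pair (grid : List (List Int × String)) (lenR lenC : Int) (r c : Int)
    (x : List Int) :
    x ∈ neighbors_two grid lenR lenC [r, c] ↔
      x ∈ pvCand r c ∧ pvOpen grid lenR lenC x = true := by
  rw [neighbors_two_pair, List.mem_filter]

theorem cand_symm (r c : Int) (x : List Int) (h : x ∈ pvCand r c) :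
    ∃ a b, x = [a, b] ∧ [r, c] ∈ pvCand a b := by
  simp only [pvCand, List.mem_cons, List.not_mem_nil, or_false] at h
  rcases h with h | h | h | h <;> subst h
  · exact ⟨r + 1, c, rfl, by simp [pvCand]⟩
  · exact ⟨r - 1, c, rfl, by simp [pvCand]⟩
  · exact ⟨r, c + 1, rfl, by simp [pvCand]⟩
  · exact ⟨r, c - 1, rfl, by simp [pvCand]⟩

-- members of a neighbour set are open
theorem Sn_open (grid : List (List Int × String)) (lenR lenC : Int) (start : List Int)
    (k : Nat) (x : List Int) (h : Sn grid lenR lenC start (k + 1) x) :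
    pvOpen grid lenR lenC x = true := by
  obtain ⟨y, -, hxy⟩ := h
  obtain ⟨r, c, -, -, hopen⟩ := neighbors_two_shape grid lenR lenC hxy
  exact hopen

-- a level two back repeats: Sn (k+2) ⊆ Sn (k+4)
theorem Sn_sub_two (grid : List (List Int × String)) (lenR lenC : Int) (start : List Int)
    (k : Nat) (x : List Int) (h : Sn grid lenR lenC start (k + 2) x) :
    Sn grid lenR lenC start (k + 4) x := by
  obtain ⟨y, hy, hxy⟩ := h
  have hyopen : pvOpen grid lenR lenC y = true := Sn_open grid lenR lenC start k y hy
  obtain ⟨r, c, rfl, hcand, hxopen⟩ := neighbors_two_shape grid lenR lenC hxy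
  obtain ⟨a, b, rfl, hback⟩ := cand_symm r c x hcand
  have hyx : [r, c] ∈ neighbors_two grid lenR lenC [a, b] :=
    (mem_neighbors_pair grid lenR lenC a b [r, c]).2 ⟨hback, hyopen⟩
  have hy3 : Sn grid lenR lenC start (k + 3) [r, c] := ⟨[a, b], ⟨[r, c], hy, hxy⟩, hyx⟩
  exact ⟨[r, c], hy3, hxy⟩

-- ---------- shared fold lemmas ----------

theorem pv_nodup_foldl_add (l : List (List Int)) (s : PySem.Set (List Int)) (h : s.Nodup) :
    (l.foldl (fun s pos => PySem.Set.add s pos) s).Nodup := by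
  induction l generalizing s with
  | nil => exact h
  | cons p l ih => exact ih _ (PySem.Set.nodup_add _ _ h)

theorem pv_mem_foldl_add (l : List (List Int)) (s : PySem.Set (List Int)) (x : List Int) :
    x ∈ l.foldl (fun s pos => PySem.Set.add s pos) s ↔ x ∈ s ∨ x ∈ l := by
  induction l generalizing s with
  | nil => simp
  | cons p l ih =>
    simp only [List.foldl_cons, ih, PySem.Set.mem_add, List.mem_cons]
    tauto

-- ---------- A side ----------

theorem part_two_step_nodup (grid : List (List Int × String)) (lenR lenC : Int)
    (todo : List (List Int)) : (part_two_step grid lenR lenC todo).Nodup := by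
  unfold part_two_step
  have key : ∀ (l : List (List Int)) (s : PySem.Set (List Int)), s.Nodup →
      (l.foldl (fun nextRound cur =>
        (neighbors_two grid lenR lenC cur).foldl (fun s pos => PySem.Set.add s pos) nextRound)
          s).Nodup := by
    intro l
    induction l with
    | nil => exact fun s h => h
    | cons y l ih => exact fun s h => ih _ (pv_nodup_foldl_add _ _ h)
  exact key _ _ List.nodup_nil

theorem part_two_step_mem (grid : List (List Int × String)) (lenR lenC : Int)
    (todo : List (List Int)) (x : List Int) :
    x ∈ part_two_step grid lenR lenC todo ↔
      ∃ y ∈ todo, x ∈ neighbors_two grid lenR lenC y := by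
  unfold part_two_step
  have key : ∀ (l : List (List Int)) (s : PySem.Set (List Int)),
      x ∈ l.foldl (fun nextRound cur =>
          (neighbors_two grid lenR lenC cur).foldl (fun s pos => PySem.Set.add s pos) nextRound) s
        ↔ x ∈ s ∨ ∃ y ∈ l, x ∈ neighbors_two grid lenR lenC y := by
    intro l
    induction l with
    | nil => simp
    | cons y l ih =>
      intro s
      rw [List.foldl_cons, ih, pv_mem_foldl_add]
      constructor
      · rintro ((h | h) | ⟨z, hz, hxz⟩)
        · exact Or.inl h
        · exact Or.inr ⟨y, List.mem_cons_self, h⟩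
        · exact Or.inr ⟨z, List.mem_cons_of_mem _ hz, hxz⟩
      · rintro (h | ⟨z, hz, hxz⟩)
        · exact Or.inl (Or.inl h)
        · rcases List.mem_cons.1 hz with rfl | hz
          · exact Or.inl (Or.inr hxz)
          · exact Or.inr ⟨z, hz, hxz⟩
  rw [key]
  simp [PySem.Set.empty]

theorem part_two_rounds_succ (grid : List (List Int × String)) (lenR lenC : Int) (k : Nat)
    (todo : List (List Int)) :
    part_two_rounds grid lenR lenC (k + 1) todo
      = part_two_step grid lenR lenC (part_two_rounds grid lenR lenC k todo) := by
  induction k generalizing todo with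
  | zero => rfl
  | succ k ih =>
    show part_two_rounds grid lenR lenC (k + 1) (part_two_step grid lenR lenC todo) = _
    rw [ih]
    rfl

theorem part_two_rounds_spec (grid : List (List Int × String)) (lenR lenC : Int)
    (start : List Int) (k : Nat) :
    (part_two_rounds grid lenR lenC k [start]).Nodup ∧
      ∀ x, x ∈ part_two_rounds grid lenR lenC k [start] ↔ Sn grid lenR lenC start k x := by
  induction k with
  | zero => exact ⟨List.nodup_singleton _, by simp [part_two_rounds, Sn]⟩
  | succ k ih =>
    rw [part_two_rounds_succ]
    refine ⟨part_two_step_nodup _ _ _ _, fun x => ?_⟩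
    rw [part_two_step_mem]
    constructor
    · rintro ⟨y, hy, hxy⟩
      exact ⟨y, (ih.2 y).1 hy, hxy⟩
    · rintro ⟨y, hy, hxy⟩
      exact ⟨y, (ih.2 y).2 hy, hxy⟩

-- ---------- B side ----------

-- pt_step's inner fold over the four candidates adds exactly the open neighbours
theorem pt_step_inner (grid : List (List Int × String)) (lenR lenC : Int) (r c : Int)
    (out : PySem.Set (List Int)) :
    ([[r + 1, c], [r - 1, c], [r, c + 1], [r, c - 1]].foldl
      (fun out rc =>
        match rc with
        | [r2, c2] =>
            if PySem.Dict.getD ⟨grid⟩ [PySem.Int.mod r2 lenR, PySem.Int.mod c2 lenC] "#"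
                != "#" then PySem.Set.add out rc
            else out
        | _ => out)
      out)
      = (neighbors_two grid lenR lenC [r, c]).foldl (fun s pos => PySem.Set.add s pos) out := by
  simp only [neighbors_two, List.filter_cons, List.filter_nil, List.foldl_cons, List.foldl_nil]
  split_ifs <;> simp_all

theorem pt_step_nodup (grid : List (List Int × String)) (lenR lenC : Int)
    (cells : List (List Int)) : (pt_step grid lenR lenC cells).Nodup := by
  unfold pt_step
  have key : ∀ (l : List (List Int)) (s : PySem.Set (List Int)), s.Nodup →
      (l.foldl (fun out cell =>
        match cell with
        | [r, c] =>
            [[r + 1, c], [r - 1, c], [r, c + 1], [r, c - 1]].foldl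
              (fun out rc =>
                match rc with
                | [r2, c2] =>
                    if PySem.Dict.getD ⟨grid⟩ [PySem.Int.mod r2 lenR, PySem.Int.mod c2 lenC] "#"
                        != "#" then PySem.Set.add out rc
                    else out
                | _ => out)
              out
        | _ => out) s).Nodup := by
    intro l
    induction l with
    | nil => exact fun s h => h
    | cons cell l ih =>
      intro s h
      rcases cell with _ | ⟨r, _ | ⟨c, _ | ⟨d, t⟩⟩⟩
      · exact ih _ h
      · exact ih _ h
      · rw [List.foldl_cons]
        refine ih _ ?_
        rw [show (match [r, c] with
            | [r, c] =>
                [[r + 1, c], [r - 1, c], [r, c + 1], [r, c - 1]].foldl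
                  (fun out rc =>
                    match rc with
                    | [r2, c2] =>
                        if PySem.Dict.getD ⟨grid⟩
                            [PySem.Int.mod r2 lenR, PySem.Int.mod c2 lenC] "#"
                            != "#" then PySem.Set.add out rc
                        else out
                    | _ => out)
                  s
            | _ => s) = (neighbors_two grid lenR lenC [r, c]).foldl
              (fun s pos => PySem.Set.add s pos) s from pt_step_inner grid lenR lenC r c s]
        exact pv_nodup_foldl_add _ _ h
      · exact ih _ h
  exact key _ _ List.nodup_nil

theorem pt_step_mem (grid : List (List Int × String)) (lenR lenC : Int)
    (cells : List (List Int)) (x : List Int) :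
    x ∈ pt_step grid lenR lenC cells ↔
      ∃ y ∈ cells, x ∈ neighbors_two grid lenR lenC y := by
  unfold pt_step
  have key : ∀ (l : List (List Int)) (s : PySem.Set (List Int)),
      x ∈ l.foldl (fun out cell =>
        match cell with
        | [r, c] =>
            [[r + 1, c], [r - 1, c], [r, c + 1], [r, c - 1]].foldl
              (fun out rc =>
                match rc with
                | [r2, c2] =>
                    if PySem.Dict.getD ⟨grid⟩ [PySem.Int.mod r2 lenR, PySem.Int.mod c2 lenC] "#"
                        != "#" then PySem.Set.add out rc
                    else out
                | _ => out)
              out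
        | _ => out) s ↔ x ∈ s ∨ ∃ y ∈ l, x ∈ neighbors_two grid lenR lenC y := by
    intro l
    induction l with
    | nil => simp
    | cons cell l ih =>
      intro s
      rw [List.foldl_cons]
      rcases cell with _ | ⟨r, _ | ⟨c, _ | ⟨d, t⟩⟩⟩
      · rw [ih]; simp [neighbors_two]
      · rw [ih]; simp [neighbors_two]
      · rw [show (match [r, c] with
            | [r, c] =>
                [[r + 1, c], [r - 1, c], [r, c + 1], [r, c - 1]].foldl
                  (fun out rc =>
                    match rc with
                    | [r2, c2] =>
                        if PySem.Dict.getD ⟨grid⟩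
                            [PySem.Int.mod r2 lenR, PySem.Int.mod c2 lenC] "#"
                            != "#" then PySem.Set.add out rc
                        else out
                    | _ => out)
                  s
            | _ => s) = (neighbors_two grid lenR lenC [r, c]).foldl
              (fun s pos => PySem.Set.add s pos) s from pt_step_inner grid lenR lenC r c s]
        rw [ih, pv_mem_foldl_add]
        constructor
        · rintro ((h | h) | ⟨z, hz, hxz⟩)
          · exact Or.inl h
          · exact Or.inr ⟨[r, c], List.mem_cons_self, h⟩
          · exact Or.inr ⟨z, List.mem_cons_of_mem _ hz, hxz⟩
        · rintro (h | ⟨z, hz, hxz⟩)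
          · exact Or.inl (Or.inl h)
          · rcases List.mem_cons.1 hz with rfl | hz
            · exact Or.inl (Or.inr hxz)
            · exact Or.inr ⟨z, hz, hxz⟩
      · rw [ih]; simp [neighbors_two]
  rw [key]
  simp [PySem.Set.empty]

-- the successive levels of Source B, as an iteration of pt_step
def ptIter (grid : List (List Int × String)) (lenR lenC : Int) (s0 : PySem.Set (List Int)) :
    Nat → PySem.Set (List Int)
  | 0 => s0
  | k + 1 => pt_step grid lenR lenC (ptIter grid lenR lenC s0 k)

-- level k is exactly Sn k (as a nodup set)
theorem ptIter_spec (grid : List (List Int × String)) (lenR lenC : Int) (start : List Int)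
    (k : Nat) :
    (ptIter grid lenR lenC (PySem.Set.ofList [start]) k).Nodup ∧
      ∀ x, x ∈ ptIter grid lenR lenC (PySem.Set.ofList [start]) k ↔
        Sn grid lenR lenC start k x := by
  induction k with
  | zero =>
    refine ⟨PySem.Set.nodup_ofList _, fun x => ?_⟩
    show x ∈ PySem.Set.ofList [start] ↔ _
    rw [PySem.Set.mem_ofList]
    simp [Sn]
  | succ k ih =>
    refine ⟨pt_step_nodup _ _ _ _, fun x => ?_⟩
    show x ∈ pt_step grid lenR lenC (ptIter grid lenR lenC (PySem.Set.ofList [start]) k) ↔ _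
    rw [pt_step_mem]
    constructor
    · rintro ⟨y, hy, hxy⟩
      exact ⟨y, (ih.2 y).1 hy, hxy⟩
    · rintro ⟨y, hy, hxy⟩
      exact ⟨y, (ih.2 y).2 hy, hxy⟩

-- the warm-up appends the next level each round, so its last element is the k-th level
theorem pt_warmup_getLast (grid : List (List Int × String)) (lenR lenC : Int) (k : Nat) :
    ∀ (ls : List (PySem.Set (List Int))), ls ≠ [] →
      (pt_warmup grid lenR lenC k ls).getLastD PySem.Set.empty
        = ptIter grid lenR lenC (ls.getLastD PySem.Set.empty) k := by
  induction k with
  | zero => intro ls h; rfl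
  | succ k ih =>
    intro ls h
    show (pt_warmup grid lenR lenC k
        (ls ++ [pt_step grid lenR lenC (ls.getLastD PySem.Set.empty)])).getLastD PySem.Set.empty = _
    rw [ih _ (by simp)]
    have hlast : (ls ++ [pt_step grid lenR lenC (ls.getLastD PySem.Set.empty)]).getLastD
        PySem.Set.empty = pt_step grid lenR lenC (ls.getLastD PySem.Set.empty) := by
      simp [List.getLastD_eq_getLast?]
    rw [hlast]
    have : ∀ (j : Nat) (s : PySem.Set (List Int)),
        ptIter grid lenR lenC (pt_step grid lenR lenC s) j
          = ptIter grid lenR lenC s (j + 1) := by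
      intro j
      induction j with
      | zero => intro s; rfl
      | succ j ihj =>
        intro s
        show pt_step grid lenR lenC (ptIter grid lenR lenC (pt_step grid lenR lenC s) j) = _
        rw [ihj]
        rfl
    exact this k _

-- invariant of pt_main: (a, b, c) are the levels j, j+1, j+2 with j ≥ 1
def PtInv (grid : List (List Int × String)) (lenR lenC : Int) (start : List Int) (j : Nat)
    (st : PySem.Set (List Int) × PySem.Set (List Int) × PySem.Set (List Int)) : Prop :=
  st.1.Nodup ∧ st.2.1.Nodup ∧ st.2.2.Nodup ∧
  (∀ x, x ∈ st.1 ↔ Sn grid lenR lenC start (j + 1) x) ∧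
  (∀ x, x ∈ st.2.1 ↔ Sn grid lenR lenC start (j + 2) x) ∧
  (∀ x, x ∈ st.2.2 ↔ Sn grid lenR lenC start (j + 3) x)

theorem pt_main_step (grid : List (List Int × String)) (lenR lenC : Int) (start : List Int)
    (j : Nat) (st : PySem.Set (List Int) × PySem.Set (List Int) × PySem.Set (List Int))
    (h : PtInv grid lenR lenC start j st) :
    PtInv grid lenR lenC start (j + 1)
      (st.2.1, st.2.2,
        PySem.Set.union st.2.1 (pt_step grid lenR lenC (PySem.Set.diff st.2.2 st.1))) := by
  obtain ⟨ha, hb, hc, Ha, Hb, Hc⟩ := h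
  refine ⟨hb, hc, PySem.Set.nodup_union _ _ hb, Hb, Hc, fun x => ?_⟩
  show x ∈ PySem.Set.union st.2.1 (pt_step grid lenR lenC (PySem.Set.diff st.2.2 st.1)) ↔ _
  rw [PySem.Set.mem_union, pt_step_mem]
  constructor
  · rintro (h | ⟨y, hy, hxy⟩)
    · -- level j+2 repeats two steps later
      exact Sn_sub_two grid lenR lenC start j x ((Hb x).1 h)
    · -- a neighbour of a cell of level j+3 is in level j+4
      rw [PySem.Set.mem_diff] at hy
      exact ⟨y, (Hc y).1 hy.1, hxy⟩
  · rintro ⟨y, hy, hxy⟩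
    by_cases hya : y ∈ st.1
    · -- y already in level j+1: x is in level j+2
      exact Or.inl ((Hb x).2 ⟨y, (Ha y).1 hya, hxy⟩)
    · exact Or.inr ⟨y, (PySem.Set.mem_diff _ _ _).2 ⟨(Hc y).2 hy, hya⟩, hxy⟩

theorem pt_main_inv (grid : List (List Int × String)) (lenR lenC : Int) (start : List Int)
    (k : Nat) :
    ∀ (j : Nat) (st : PySem.Set (List Int) × PySem.Set (List Int) × PySem.Set (List Int)),
      PtInv grid lenR lenC start j st →
      PtInv grid lenR lenC start (j + k) (pt_main grid lenR lenC k st) := by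
  induction k with
  | zero => intro j st h; exact h
  | succ k ih =>
    intro j st h
    have := ih (j + 1) _ (pt_main_step grid lenR lenC start j st h)
    have harith : j + 1 + k = j + (k + 1) := by omega
    rw [harith] at this
    exact this

-- two nodup lists with the same membership have the same length
theorem pv_length_eq_of_mem_iff (l1 l2 : List (List Int)) (h1 : l1.Nodup) (h2 : l2.Nodup)
    (h : ∀ x, x ∈ l1 ↔ x ∈ l2) : l1.length = l2.length :=
  ((List.perm_ext_iff_of_nodup h1 h2).2 h).length_eq

-- ---------- assembling the two sides ----------

theorem part_two_eq_alt (grid : List (List Int × String)) (start : List Int) (n_steps : Int) :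
    part_two grid start n_steps = part_two_alt grid start n_steps := by
  unfold part_two part_two_alt
  simp only []
  generalize (1 + ((PySem.List.max? (grid.map (fun kv => kv.1.headD 0)) (fun r => r)).getD 0) : Int) = lenR
  generalize (1 + ((PySem.List.max? (grid.map (fun kv => kv.1.getD 1 0)) (fun c => c)).getD 0) : Int) = lenC
  obtain ⟨hAnodup, hAmem⟩ := part_two_rounds_spec grid lenR lenC start n_steps.toNat
  by_cases hn : n_steps ≤ 3
  · rw [if_pos hn]
    have hmin : (min n_steps 3).toNat = n_steps.toNat := by omega
    rw [hmin]
    rw [pt_warmup_getLast grid lenR lenC n_steps.toNat [PySem.Set.ofList [start]] (by simp)]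
    have hstart : ([PySem.Set.ofList [start]].getLastD PySem.Set.empty)
        = PySem.Set.ofList [start] := rfl
    rw [hstart]
    obtain ⟨hBnodup, hBmem⟩ := ptIter_spec grid lenR lenC start n_steps.toNat
    exact congrArg _ (pv_length_eq_of_mem_iff _ _ hAnodup hBnodup
      (fun x => by rw [hAmem, hBmem]))
  · rw [if_neg hn]
    have hmin : (min n_steps 3).toNat = 3 := by omega
    rw [hmin]
    -- the warm-up builds the four literal levels
    have hwarm : pt_warmup grid lenR lenC 3 [PySem.Set.ofList [start]]
        = [PySem.Set.ofList [start],
           ptIter grid lenR lenC (PySem.Set.ofList [start]) 1,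
           ptIter grid lenR lenC (PySem.Set.ofList [start]) 2,
           ptIter grid lenR lenC (PySem.Set.ofList [start]) 3] := rfl
    rw [hwarm]
    have hg3 : (PySem.List.pyGet? [PySem.Set.ofList [start],
           ptIter grid lenR lenC (PySem.Set.ofList [start]) 1,
           ptIter grid lenR lenC (PySem.Set.ofList [start]) 2,
           ptIter grid lenR lenC (PySem.Set.ofList [start]) 3] (-3)).getD PySem.Set.empty
        = ptIter grid lenR lenC (PySem.Set.ofList [start]) 1 := rfl
    have hg2 : (PySem.List.pyGet? [PySem.Set.ofList [start],
           ptIter grid lenR lenC (PySem.Set.ofList [start]) 1,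
           ptIter grid lenR lenC (PySem.Set.ofList [start]) 2,
           ptIter grid lenR lenC (PySem.Set.ofList [start]) 3] (-2)).getD PySem.Set.empty
        = ptIter grid lenR lenC (PySem.Set.ofList [start]) 2 := rfl
    have hg1 : (PySem.List.pyGet? [PySem.Set.ofList [start],
           ptIter grid lenR lenC (PySem.Set.ofList [start]) 1,
           ptIter grid lenR lenC (PySem.Set.ofList [start]) 2,
           ptIter grid lenR lenC (PySem.Set.ofList [start]) 3] (-1)).getD PySem.Set.empty
        = ptIter grid lenR lenC (PySem.Set.ofList [start]) 3 := rfl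
    rw [hg3, hg2, hg1]
    have hinv0 : PtInv grid lenR lenC start 0
        (ptIter grid lenR lenC (PySem.Set.ofList [start]) 1,
         ptIter grid lenR lenC (PySem.Set.ofList [start]) 2,
         ptIter grid lenR lenC (PySem.Set.ofList [start]) 3) := by
      obtain ⟨h1n, h1m⟩ := ptIter_spec grid lenR lenC start 1
      obtain ⟨h2n, h2m⟩ := ptIter_spec grid lenR lenC start 2
      obtain ⟨h3n, h3m⟩ := ptIter_spec grid lenR lenC start 3
      exact ⟨h1n, h2n, h3n, h1m, h2m, h3m⟩
    have hinv := pt_main_inv grid lenR lenC start (n_steps - 3).toNat 0 _ hinv0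
    obtain ⟨-, -, hfn, -, -, Hf⟩ := hinv
    have harith : 0 + (n_steps - 3).toNat + 3 = n_steps.toNat := by omega
    refine congrArg _ (pv_length_eq_of_mem_iff _ _ hAnodup hfn (fun x => ?_))
    rw [hAmem, Hf, ← harith]

-- ===== VERDICT (by name: the statement is the Claim_ definition above) =====
theorem part_two_spec : Claim_equal_part_two := by
  intro grid start n_steps _ _
  unfold Spec_part_two
  exact part_two_eq_alt grid start n_steps
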